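-- pv_equiv track=rewrite | github.com/koychevo/python_HackBulgaria | Programming0-1/week4/winter.py | winter_is_coming
-- ===== SOURCE A (Python) =====
-- def winter_is_coming(seasons):
--     count = 0
--     for season in seasons:
--         if season == "winter":
--             count = 0
--         else:
--             count += 1
--         if count >= 5:
--             return True
--     return False
-- ===== SOURCE B (Python) =====
-- from itertools import groupby
--
-- def winter_is_coming(seasons):
--     for is_winter, group in groupby(seasons, key=lambda s: s == "winter"):
--         if not is_winter and sum(1 for _ in group) >= 5:
--             return True
--     return False
-- ===== Notes on version B (the rewrite author's own statement) =====
-- stated objective: idiomatic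
-- what changed: B partitions the sequence into maximal runs with itertools.groupby and tests each non-winter run's length, instead of maintaining a reset counter inline.
import Mathlib
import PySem

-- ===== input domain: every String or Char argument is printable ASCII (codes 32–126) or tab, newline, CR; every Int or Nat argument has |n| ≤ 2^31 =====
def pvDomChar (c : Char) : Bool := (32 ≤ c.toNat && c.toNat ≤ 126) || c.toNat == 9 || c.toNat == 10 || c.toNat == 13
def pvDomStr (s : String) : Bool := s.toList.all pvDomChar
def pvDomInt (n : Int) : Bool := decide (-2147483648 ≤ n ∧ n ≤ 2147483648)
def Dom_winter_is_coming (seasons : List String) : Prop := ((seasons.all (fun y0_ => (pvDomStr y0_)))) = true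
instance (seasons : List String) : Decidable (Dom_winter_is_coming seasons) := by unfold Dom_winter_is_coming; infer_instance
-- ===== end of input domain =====

-- B replaces A's inline reset counter by a groupby partition into maximal runs (idiomatic decomposition); same O(n) cost.

-- ===== PORT A =====
-- the for-loop with early return, carrying the counter `count`
def winterGoA (count : Int) : List String → Bool
  | [] => false
  | season :: rest =>
    let count' := if season == "winter" then 0 else count + 1
    if 5 ≤ count' then true else winterGoA count' rest

def winter_is_coming (seasons : List String) : Bool := winterGoA 0 seasons

-- ===== PORT B =====
-- groupby's key: is this season a winter one?
def notWinter (t : String) : Bool := !(t == "winter")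

-- iterate the maximal groups of groupby(key = s == "winter"); a non-winter group
-- starting at `s` has length 1 + (takeWhile notWinter rest); skip winter groups.
def winterGoB : List String → Bool
  | [] => false
  | s :: rest =>
    if s == "winter" then winterGoB rest
    else if 5 ≤ 1 + (rest.takeWhile notWinter).length
      then true
      else winterGoB (rest.dropWhile notWinter)
termination_by l => l.length
decreasing_by
  · simp
  · have := List.length_dropWhile_le notWinter rest
    simp at this ⊢; omega

def winter_is_coming_alt (seasons : List String) : Bool := winterGoB seasons

-- ===== PRECONDITION & SPEC =====
def Spec_winter_is_coming (seasons : List String) (out : Bool) : Prop := out = winter_is_coming_alt seasons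
instance (seasons : List String) (out : Bool) : Decidable (Spec_winter_is_coming seasons out) := by unfold Spec_winter_is_coming; infer_instance

-- ===== CLAIM (what is proved, stated in full; the proofs are below) =====
def Claim_equal_winter_is_coming : Prop := ∀ (seasons : List String), Dom_winter_is_coming seasons → Spec_winter_is_coming seasons (winter_is_coming seasons)

-- ===== LEMMAS AND PROOFS =====

lemma notWinter_winter : notWinter "winter" = false := by simp [notWinter]

lemma notWinter_of_ne {s : String} (h : ¬ s = "winter") : notWinter s = true := by
  simp [notWinter, h]

lemma winterGoB_cons_winter (l : List String) : winterGoB ("winter" :: l) = winterGoB l := by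
  rw [winterGoB]; simp

-- B restated through the head run: test the leading non-winter run, then recurse past it.
lemma winterGoB_run (l : List String) :
    winterGoB l =
      (decide (5 ≤ (l.takeWhile notWinter).length)
        || winterGoB (l.dropWhile notWinter)) := by
  cases l with
  | nil => simp [winterGoB]
  | cons s rest =>
    by_cases hw : s = "winter"
    · subst hw
      rw [List.takeWhile_cons, List.dropWhile_cons, notWinter_winter, winterGoB_cons_winter]
      simp [winterGoB_cons_winter]
    · have hb : (s == "winter") = false := by simp [hw]
      rw [winterGoB, List.takeWhile_cons, List.dropWhile_cons, notWinter_of_ne hw]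
      simp only [hb, Bool.false_eq_true, if_false, if_true, List.length_cons]
      by_cases h5 : 5 ≤ 1 + (rest.takeWhile notWinter).length
      · rw [if_pos h5]
        have h : 5 ≤ (rest.takeWhile notWinter).length + 1 := by omega
        simp [h]
      · rw [if_neg h5]
        have h : ¬ 5 ≤ (rest.takeWhile notWinter).length + 1 := by omega
        simp [h]

-- loop invariant: A's counter c (with 0 ≤ c < 5) plus the leading non-winter run decides the verdict
lemma winterGoA_eq (l : List String) : ∀ c : Int, 0 ≤ c → c < 5 →
    winterGoA c l =
      (decide (5 ≤ c + ((l.takeWhile notWinter).length : Int))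
        || winterGoB (l.dropWhile notWinter)) := by
  induction l with
  | nil =>
    intro c h0 h5
    simp only [winterGoA, List.takeWhile_nil, List.length_nil]
    simp only [winterGoB, List.dropWhile_nil, Bool.or_false, Nat.cast_zero]
    rw [show (decide ((5:Int) ≤ c + 0)) = false from by simp; omega]
  | cons s rest ih =>
    intro c h0 h5
    by_cases hw : s = "winter"
    · subst hw
      rw [winterGoA, List.takeWhile_cons, List.dropWhile_cons, notWinter_winter]
      simp only [beq_self_eq_true, if_true, Bool.false_eq_true, if_false, List.length_nil]
      rw [if_neg (by omega : ¬ (5:Int) ≤ 0)]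
      rw [ih 0 le_rfl (by omega)]
      have h1 : ((5:Int) ≤ 0 + ((rest.takeWhile notWinter).length : Int))
          ↔ (5 ≤ (rest.takeWhile notWinter).length) := by omega
      simp only [h1]
      rw [← winterGoB_run rest, winterGoB_cons_winter]
      simp only [Nat.cast_zero, add_zero]
      have h2 : (decide ((5:Int) ≤ c)) = false := by simp; omega
      simp [h2]
    · have hb : (s == "winter") = false := by simp [hw]
      rw [winterGoA, List.takeWhile_cons, List.dropWhile_cons, notWinter_of_ne hw]
      simp only [hb, Bool.false_eq_true, if_false, if_true, List.length_cons]
      by_cases hc : (5:Int) ≤ c + 1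
      · rw [if_pos hc]
        have h : (5:Int) ≤ c + (((rest.takeWhile notWinter).length + 1 : Nat) : Int) := by
          push_cast; omega
        simp only [h, decide_true, Bool.true_or]
      · rw [if_neg hc, ih (c+1) (by omega) (by omega)]
        have h : ((5:Int) ≤ c + (((rest.takeWhile notWinter).length + 1 : Nat) : Int))
            ↔ ((5:Int) ≤ (c+1) + ((rest.takeWhile notWinter).length : Int)) := by
          push_cast; omega
        simp only [h]

-- ===== VERDICT (by name: the statement is the Claim_ definition above) =====
theorem winter_is_coming_spec : Claim_equal_winter_is_coming := by
  intro seasons _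
  unfold Spec_winter_is_coming winter_is_coming winter_is_coming_alt
  rw [winterGoA_eq seasons 0 le_rfl (by omega), winterGoB_run seasons]
  have h : ((5:Int) ≤ 0 + ((seasons.takeWhile notWinter).length : Int))
      ↔ ((5:Nat) ≤ (seasons.takeWhile notWinter).length) := by omega
  simp only [h]
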